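-- pv_equiv track=rewrite | github.com/etoshy/GitHub-Username-Checker | main.py | generate_names
-- ===== SOURCE A (Python) =====
-- import itertools
-- import string
--
-- def generate_names(length, use_letters, use_numbers, prefix, suffix):
--     characters = ""
--     if use_letters:
--         characters += string.ascii_lowercase
--     if use_numbers:
--         characters += string.digits
--
--     remaining_length = length - len(prefix) - len(suffix)
--
--     if remaining_length < 0:
--         return [prefix + suffix]  # Caso o prefixo + sufixo já ultrapasse o limite, apenas verifica essa única palavra
--
--     return (prefix + "".join(combo) + suffix for combo in itertools.product(characters, repeat=remaining_length))
-- ===== SOURCE B (Python) =====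
-- import string
--
-- def generate_names(length, use_letters, use_numbers, prefix, suffix):
--     pool = ""
--     if use_letters:
--         pool += string.ascii_lowercase
--     if use_numbers:
--         pool += string.digits
--
--     remaining_length = length - len(prefix) - len(suffix)
--
--     if remaining_length < 0:
--         return [prefix + suffix]
--
--     def gen(n):
--         # recursively enumerate all strings of length n over pool, lexicographic in pool order
--         if n == 0:
--             yield ""
--         else:
--             for c in pool:
--                 for tail in gen(n - 1):
--                     yield c + tail
--
--     return (prefix + body + suffix for body in gen(remaining_length))
-- ===== Notes on version B (the rewrite author's own statement) =====
-- stated objective: alternative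
-- what changed: Replaces the itertools.product iterative pool-fold (which extends partial tuples at the right end) with a hand-written recursive generator that builds each combination front-to-back (c + tail), same lexicographic order.
import Mathlib
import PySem

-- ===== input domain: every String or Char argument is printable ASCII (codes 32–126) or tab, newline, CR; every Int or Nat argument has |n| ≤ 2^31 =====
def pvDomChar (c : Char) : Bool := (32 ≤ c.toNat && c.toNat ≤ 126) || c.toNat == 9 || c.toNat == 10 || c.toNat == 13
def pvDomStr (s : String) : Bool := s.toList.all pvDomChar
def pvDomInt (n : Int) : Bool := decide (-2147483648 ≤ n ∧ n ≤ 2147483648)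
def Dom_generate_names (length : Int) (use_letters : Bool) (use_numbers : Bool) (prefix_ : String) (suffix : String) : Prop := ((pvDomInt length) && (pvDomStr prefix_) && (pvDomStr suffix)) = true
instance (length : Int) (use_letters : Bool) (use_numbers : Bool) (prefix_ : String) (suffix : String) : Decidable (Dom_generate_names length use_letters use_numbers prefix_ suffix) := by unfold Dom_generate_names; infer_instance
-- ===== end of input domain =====

-- ===== PORT A =====
-- Port of A (return-value semantics: A returns a lazy generator in the main branch;
-- the port materialises it as the list it yields, in the same order).
-- itertools.product(pool, repeat=n) is ported as its documented equivalent: an n-step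
-- fold extending every partial tuple with each pool element at the right end.
def generate_names (length : Int) (use_letters : Bool) (use_numbers : Bool) (prefix_ : String) (suffix : String) : List String :=
  let characters : List Char :=
    (if use_letters then "abcdefghijklmnopqrstuvwxyz".toList else []) ++
    (if use_numbers then "0123456789".toList else [])
  let remaining_length : Int := length - (prefix_.toList.length : Int) - (suffix.toList.length : Int)
  if remaining_length < 0 then [prefix_ ++ suffix]
  else
    ((List.range remaining_length.toNat).foldl
        (fun acc _ => acc.flatMap (fun combo => characters.map (fun y => combo ++ [y]))) [([] : List Char)]).map
      (fun combo => prefix_ ++ String.mk combo ++ suffix)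

-- ===== PORT B =====
-- B's recursive generator gen(n): yields "" once for n = 0, else c + tail for each
-- pool char c and each tail of gen(n-1); strings are represented as List Char
-- (c + tail = c :: tail), converted by String.mk in the final wrapper.
def pvGenRec (pool : List Char) : Nat → List (List Char)
  | 0 => [[]]
  | n + 1 => pool.flatMap (fun c => (pvGenRec pool n).map (fun tail => c :: tail))

def generate_names_alt (length : Int) (use_letters : Bool) (use_numbers : Bool) (prefix_ : String) (suffix : String) : List String :=
  let pool : List Char :=
    (if use_letters then "abcdefghijklmnopqrstuvwxyz".toList else []) ++
    (if use_numbers then "0123456789".toList else [])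
  let remaining_length : Int := length - (prefix_.toList.length : Int) - (suffix.toList.length : Int)
  if remaining_length < 0 then [prefix_ ++ suffix]
  else (pvGenRec pool remaining_length.toNat).map (fun body => prefix_ ++ String.mk body ++ suffix)

-- ===== PRECONDITION & SPEC =====
def Spec_generate_names (length : Int) (use_letters : Bool) (use_numbers : Bool) (prefix_ : String) (suffix : String) (out : List String) : Prop := out = generate_names_alt length use_letters use_numbers prefix_ suffix
instance (length : Int) (use_letters : Bool) (use_numbers : Bool) (prefix_ : String) (suffix : String) (out : List String) : Decidable (Spec_generate_names length use_letters use_numbers prefix_ suffix out) := by unfold Spec_generate_names; infer_instance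

-- ===== CLAIM (what is proved, stated in full; the proofs are below) =====
def Claim_equal_generate_names : Prop := ∀ (length : Int) (use_letters : Bool) (use_numbers : Bool) (prefix_ : String) (suffix : String), Dom_generate_names length use_letters use_numbers prefix_ suffix → Spec_generate_names length use_letters use_numbers prefix_ suffix (generate_names length use_letters use_numbers prefix_ suffix)

-- ===== LEMMAS AND PROOFS =====

-- one right-extension step applied to all length-n words gives all length-(n+1) words
theorem pvSnoc_step (pool : List Char) (n : Nat) :
    (pvGenRec pool n).flatMap (fun combo => pool.map (fun y => combo ++ [y])) =
      pvGenRec pool (n + 1) := by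
  induction n with
  | zero =>
    show List.flatMap (fun combo => pool.map (fun y => combo ++ [y])) [[]] = pvGenRec pool 1
    rw [List.flatMap_singleton, pvGenRec, pvGenRec]
    induction pool with
    | nil => rfl
    | cons c cs ih => simp_all
  | succ n ih =>
    show (pvGenRec pool (n+1)).flatMap (fun combo => pool.map (fun y => combo ++ [y])) = pvGenRec pool (n+2)
    rw [pvGenRec, List.flatMap_assoc]
    conv_rhs => rw [pvGenRec, ← ih]
    refine List.flatMap_congr (fun c _ => ?_)
    rw [List.flatMap_map, List.map_flatMap]
    refine List.flatMap_congr (fun combo _ => ?_)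
    simp

theorem pvFold_eq_rec (pool : List Char) (n : Nat) :
    (List.range n).foldl
        (fun acc _ => acc.flatMap (fun combo => pool.map (fun y => combo ++ [y]))) [([] : List Char)] =
      pvGenRec pool n := by
  induction n with
  | zero => simp [pvGenRec]
  | succ n ih => rw [List.range_succ, List.foldl_append, ih, List.foldl_cons, List.foldl_nil, pvSnoc_step]

-- ===== VERDICT (by name: the statement is the Claim_ definition above) =====
theorem generate_names_spec : Claim_equal_generate_names := by
  intro length use_letters use_numbers prefix_ suffix _
  unfold Spec_generate_names generate_names generate_names_alt
  simp only [pvFold_eq_rec]
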